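-- pv_equiv track=rewrite | github.com/liside163/essence_forge | core/model_checkpoint.py | _coerce_tuple_length
-- ===== SOURCE A (Python) =====
-- from typing import Any, Dict, Iterable, Mapping, Tuple
--
-- def _coerce_tuple_length(values: Iterable[int], target_len: int, fallback: int) -> Tuple[int, ...]:
--     seq = tuple(int(v) for v in values)
--     if target_len <= 0:
--         return seq
--     if len(seq) == target_len:
--         return seq
--     if len(seq) == 0:
--         return tuple(int(fallback) for _ in range(target_len))
--     if len(seq) > target_len:
--         return seq[:target_len]
--     # 长度不足时重复最后一个值补齐
--     pad = tuple(int(seq[-1]) for _ in range(target_len - len(seq)))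
--     return seq + pad
-- ===== SOURCE B (Python) =====
-- def _coerce_tuple_length(values, target_len, fallback):
--     seq = tuple(int(v) for v in values)
--     if target_len <= 0:
--         return seq
--     fill = int(seq[-1]) if seq else int(fallback)
--     return tuple(seq[i] if i < len(seq) else fill for i in range(target_len))
-- ===== Notes on version B (the rewrite author's own statement) =====
-- stated objective: simpler
-- what changed: Replaces A's four-way branch cascade (equal/empty/truncate/pad) by computing one fill value and building the result with a single comprehension over output positions, so truncation and padding both fall out of the same index loop.
import Mathlib
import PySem

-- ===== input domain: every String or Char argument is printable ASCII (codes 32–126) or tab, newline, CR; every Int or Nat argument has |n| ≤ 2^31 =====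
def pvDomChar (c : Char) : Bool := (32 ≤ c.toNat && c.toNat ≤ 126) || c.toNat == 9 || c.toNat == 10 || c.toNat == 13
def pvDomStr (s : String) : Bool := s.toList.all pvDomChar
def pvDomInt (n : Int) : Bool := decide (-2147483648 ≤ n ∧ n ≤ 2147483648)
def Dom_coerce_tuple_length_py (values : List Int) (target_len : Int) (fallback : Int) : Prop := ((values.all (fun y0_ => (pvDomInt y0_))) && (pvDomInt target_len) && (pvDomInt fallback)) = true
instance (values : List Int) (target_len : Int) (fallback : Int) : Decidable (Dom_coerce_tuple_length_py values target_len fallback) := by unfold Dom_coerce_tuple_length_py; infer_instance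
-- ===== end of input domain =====

-- ===== PORT A =====
-- Port of A: branch cascade (equal length / empty / truncate / pad with last element).
def coerce_tuple_length_py (values : List Int) (target_len : Int) (fallback : Int) : List Int :=
  let seq := values.map (fun v => v)
  if target_len ≤ 0 then seq
  else if (seq.length : Int) = target_len then seq
  else if seq.length = 0 then (PySem.List.pyRange 0 target_len 1).map (fun _ => fallback)
  else if (seq.length : Int) > target_len then PySem.List.slice seq none (some target_len)
  else seq ++ (PySem.List.pyRange 0 (target_len - (seq.length : Int)) 1).map
      (fun _ => PySem.List.pyGetD seq (-1) 0)

-- ===== PORT B =====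
-- Port of B: one fill value, then a single comprehension over output positions.
def coerce_tuple_length_py_alt (values : List Int) (target_len : Int) (fallback : Int) : List Int :=
  let seq := values.map (fun v => v)
  if target_len ≤ 0 then seq
  else
    let fill := if seq.isEmpty then fallback else PySem.List.pyGetD seq (-1) 0
    (PySem.List.pyRange 0 target_len 1).map
      (fun i => if i < (seq.length : Int) then PySem.List.pyGetD seq i 0 else fill)

-- ===== PRECONDITION & SPEC =====
def Spec_coerce_tuple_length_py (values : List Int) (target_len : Int) (fallback : Int) (out : List Int) : Prop := out = coerce_tuple_length_py_alt values target_len fallback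
instance (values : List Int) (target_len : Int) (fallback : Int) (out : List Int) : Decidable (Spec_coerce_tuple_length_py values target_len fallback out) := by unfold Spec_coerce_tuple_length_py; infer_instance

-- ===== CLAIM (what is proved, stated in full; the proofs are below) =====
def Claim_equal_coerce_tuple_length_py : Prop := ∀ (values : List Int) (target_len : Int) (fallback : Int), Dom_coerce_tuple_length_py values target_len fallback → Spec_coerce_tuple_length_py values target_len fallback (coerce_tuple_length_py values target_len fallback)

-- ===== LEMMAS AND PROOFS =====

-- ===== VERDICT (by name: the statement is the Claim_ definition above) =====
-- B's position loop restricted to the first m positions produces xs.take m.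
lemma pv_map_take (xs : List Int) (fill : Int) (m : Nat) (h : m ≤ xs.length) :
    (PySem.List.pyRange 0 (m : Int) 1).map
      (fun i => if i < (xs.length : Int) then PySem.List.pyGetD xs i 0 else fill)
      = xs.take m := by
  induction m with
  | zero => simp [PySem.List.pyRange_one_eq_nil]
  | succ k ih =>
    have hk : k < xs.length := by omega
    rw [show ((k + 1 : Nat) : Int) = (k : Int) + 1 by push_cast; ring,
        PySem.List.pyRange_one_succ_right (by positivity), List.map_append,
        ih (by omega), List.map_singleton,
        if_pos (show ((k : Int)) < (xs.length : Int) by exact_mod_cast hk),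
        PySem.List.pyGetD_natCast, List.take_add_one]
    simp [hk, List.getD_eq_getElem?_getD]

theorem coerce_tuple_length_py_spec : Claim_equal_coerce_tuple_length_py := by
  intro values target_len fallback _
  unfold Spec_coerce_tuple_length_py coerce_tuple_length_py coerce_tuple_length_py_alt
  simp only [List.map_id_fun', id]
  by_cases h0 : target_len ≤ 0
  · simp [h0]
  · simp only [h0, if_false]
    by_cases hne : values = []
    · subst hne
      simp only [List.length_nil, Int.natCast_zero, List.isEmpty_nil, if_true]
      rw [if_neg (show ¬(0 : Int) = target_len by omega)]
      apply List.map_congr_left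
      intro i hi
      have := (PySem.List.mem_pyRange_one).1 hi
      rw [if_neg (by omega)]
    · have hlen : values.length ≠ 0 := by simpa using hne
      have hie : values.isEmpty = false := by simpa using hne
      simp only [hie, Bool.false_eq_true, if_false, if_neg hlen]
      by_cases heq : (values.length : Int) = target_len
      · rw [if_pos heq, ← heq, pv_map_take values _ values.length le_rfl,
            List.take_length]
      · rw [if_neg heq]
        by_cases hgt : (values.length : Int) > target_len
        · rw [if_pos hgt]
          have ht : target_len = ((target_len.toNat : Nat) : Int) := by omega
          rw [ht, PySem.List.slice_to_natCast,
              pv_map_take values _ target_len.toNat (by omega)]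
        · rw [if_neg hgt]
          have hlt : (values.length : Int) < target_len := by omega
          rw [PySem.List.pyRange_one_append 0 (values.length : Int) target_len
              (by positivity) (by omega), List.map_append,
              pv_map_take values _ values.length le_rfl, List.take_length]
          congr 1
          rw [show (List.map
                (fun i => if i < (values.length : Int) then PySem.List.pyGetD values i 0
                  else PySem.List.pyGetD values (-1) 0)
                (PySem.List.pyRange (values.length : Int) target_len 1))
              = (PySem.List.pyRange (values.length : Int) target_len 1).map
                (fun _ => PySem.List.pyGetD values (-1) 0) from
            List.map_congr_left (fun i hi => by
              have := (PySem.List.mem_pyRange_one).1 hi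
              rw [if_neg (by omega)])]
          simp [List.map_const', PySem.List.length_pyRange_one]
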